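-- pv_equiv track=rewrite | github.com/adcalvoval/href-indicators | analyze-duplicate-indicators.py | get_year_range
-- ===== SOURCE A (Python) =====
-- def get_year_range(compiled_data, filename):
--     """Get the year range available in a data file."""
--     if filename not in compiled_data or not compiled_data[filename]:
--         return None, None
--
--     years = set()
--     for row in compiled_data[filename]:
--         # Try different year column names
--         year_value = None
--         if 'year' in row and row['year']:
--             year_value = row['year']
--         elif 'YEAR' in row and row['YEAR']:
--             year_value = row['YEAR']
--         elif 'DIM_TIME' in row and row['DIM_TIME']:
--             year_value = row['DIM_TIME']
--         elif 'Year' in row and row['Year']: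
--             year_value = row['Year']
--
--         if year_value:
--             try:
--                 years.add(int(year_value))
--             except (ValueError, TypeError):
--                 pass
--
--     if not years:
--         return None, None
--
--     return min(years), max(years)
-- ===== SOURCE B (Python) =====
-- def _row_year(row):
--     """First present-and-truthy year column, parsed; None if absent or unparsable."""
--     for key in ('year', 'YEAR', 'DIM_TIME', 'Year'):
--         v = row.get(key)
--         if v:
--             try:
--                 return int(v)
--             except (ValueError, TypeError):
--                 return None
--     return None
--
--
-- def get_year_range(compiled_data, filename):
--     """Get the year range available in a data file."""
--     lo = hi = None
--     for row in compiled_data.get(filename) or ():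
--         y = _row_year(row)
--         if y is not None:
--             lo = y if lo is None or y < lo else lo
--             hi = y if hi is None or y > hi else hi
--     return lo, hi
-- ===== Notes on version B (the rewrite author's own statement) =====
-- stated objective: simpler
-- what changed: Replaces the collected set of years plus final min()/max() with two running lo/hi scalars updated in one pass, and factors the four-way column selection and parse into a small per-row helper driven by a key tuple and dict.get.
import Mathlib
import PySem

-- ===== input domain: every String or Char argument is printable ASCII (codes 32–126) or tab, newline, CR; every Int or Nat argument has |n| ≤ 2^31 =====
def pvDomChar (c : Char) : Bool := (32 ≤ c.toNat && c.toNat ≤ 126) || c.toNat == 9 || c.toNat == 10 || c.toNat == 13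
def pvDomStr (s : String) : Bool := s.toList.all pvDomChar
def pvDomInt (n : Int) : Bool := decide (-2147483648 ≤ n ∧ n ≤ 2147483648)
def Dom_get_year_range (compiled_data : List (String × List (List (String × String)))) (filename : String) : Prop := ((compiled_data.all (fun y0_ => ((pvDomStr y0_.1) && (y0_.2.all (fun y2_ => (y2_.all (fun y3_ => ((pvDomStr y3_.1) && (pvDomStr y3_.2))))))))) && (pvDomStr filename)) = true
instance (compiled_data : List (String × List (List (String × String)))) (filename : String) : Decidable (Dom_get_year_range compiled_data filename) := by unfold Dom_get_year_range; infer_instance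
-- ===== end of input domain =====

-- B replaces A's collected set of years plus final min()/max() by two running lo/hi
-- scalars in one pass, with the four-way column selection factored into a key-list helper.

-- ===== PORT A =====
-- A's per-row four-way selection: first of 'year','YEAR','DIM_TIME','Year' that is
-- present and truthy (non-empty string); returns the selected string if any.
def pvSelA (row : List (String × String)) : Option String :=
  if (PySem.Dict.mk row).contains "year" && ((PySem.Dict.mk row).getD "year" "" != "") then some ((PySem.Dict.mk row).getD "year" "")
  else if (PySem.Dict.mk row).contains "YEAR" && ((PySem.Dict.mk row).getD "YEAR" "" != "") then some ((PySem.Dict.mk row).getD "YEAR" "")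
  else if (PySem.Dict.mk row).contains "DIM_TIME" && ((PySem.Dict.mk row).getD "DIM_TIME" "" != "") then some ((PySem.Dict.mk row).getD "DIM_TIME" "")
  else if (PySem.Dict.mk row).contains "Year" && ((PySem.Dict.mk row).getD "Year" "" != "") then some ((PySem.Dict.mk row).getD "Year" "")
  else none

-- A's accumulation loop: years = set(); for row in rows: ... years.add(int(...))
def pvYearsSet (rows : List (List (String × String))) : PySem.Set Int :=
  rows.foldl (fun s row =>
    match pvSelA row with
    | some v =>
      match PySem.Int.ofStr? v with     -- int(year_value); except ValueError: pass
      | some n => PySem.Set.add s n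
      | none => s
    | none => s) PySem.Set.empty

def get_year_range (compiled_data : List (String × List (List (String × String)))) (filename : String) : Option Int × Option Int :=
  if !(PySem.Dict.mk compiled_data).contains filename || ((PySem.Dict.mk compiled_data).getD filename []).isEmpty then (none, none)
  else
    if (pvYearsSet ((PySem.Dict.mk compiled_data).getD filename [])).isEmpty then (none, none)
    else (PySem.List.min? (pvYearsSet ((PySem.Dict.mk compiled_data).getD filename [])) (fun x => x),
          PySem.List.max? (pvYearsSet ((PySem.Dict.mk compiled_data).getD filename [])) (fun x => x))

-- ===== PORT B =====
-- _row_year's loop over the key tuple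
def pvRowYearGo : List String → List (String × String) → Option Int
  | [], _ => none
  | k :: ks, row =>
    match (PySem.Dict.mk row).get? k with     -- row.get(key)
    | some v => if v != "" then PySem.Int.ofStr? v else pvRowYearGo ks row
    | none => pvRowYearGo ks row

def pvRowYear (row : List (String × String)) : Option Int :=
  pvRowYearGo ["year", "YEAR", "DIM_TIME", "Year"] row

def get_year_range_alt (compiled_data : List (String × List (List (String × String)))) (filename : String) : Option Int × Option Int :=
  -- .get(filename) or (): missing key and empty list both iterate nothing
  (((PySem.Dict.mk compiled_data).get? filename).getD []).foldl (fun (p : Option Int × Option Int) row =>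
    match pvRowYear row with
    | some y =>
      ((match p.1 with | none => some y | some lo => if y < lo then some y else some lo),
       (match p.2 with | none => some y | some hi => if hi < y then some y else some hi))
    | none => p) (none, none)

-- ===== PRECONDITION & SPEC =====
def Spec_get_year_range (compiled_data : List (String × List (List (String × String)))) (filename : String) (out : Option Int × Option Int) : Prop := out = get_year_range_alt compiled_data filename
instance (compiled_data : List (String × List (List (String × String)))) (filename : String) (out : Option Int × Option Int) : Decidable (Spec_get_year_range compiled_data filename out) := by unfold Spec_get_year_range; infer_instance

-- ===== CLAIM (what is proved, stated in full; the proofs are below) =====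
def Claim_equal_get_year_range : Prop := ∀ (compiled_data : List (String × List (List (String × String)))) (filename : String), Dom_get_year_range compiled_data filename → Spec_get_year_range compiled_data filename (get_year_range compiled_data filename)

-- ===== LEMMAS AND PROOFS =====

-- per-row agreement: A's selection followed by int() equals B's helper
theorem pvRow_eq (row : List (String × String)) :
    (match pvSelA row with
     | some v => PySem.Int.ofStr? v
     | none => none) = pvRowYear row := by
  unfold pvSelA pvRowYear
  rw [PySem.Dict.contains_eq_isSome_get?, PySem.Dict.contains_eq_isSome_get?,
    PySem.Dict.contains_eq_isSome_get?, PySem.Dict.contains_eq_isSome_get?]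
  cases h1 : (PySem.Dict.mk row).get? "year" <;>
    cases h2 : (PySem.Dict.mk row).get? "YEAR" <;>
      cases h3 : (PySem.Dict.mk row).get? "DIM_TIME" <;>
        cases h4 : (PySem.Dict.mk row).get? "Year" <;>
          (try simp only [pvRowYearGo, PySem.Dict.getD, h1, h2, h3, h4, Option.getD_some,
            Option.getD_none, Option.isSome_some, Option.isSome_none, Bool.false_and,
            Bool.true_and, Bool.false_eq_true, if_false]) <;>
          (try split_ifs) <;>
          (try simp_all)

-- min over a set extended by one element is the running-min update
theorem pvMinAdd (s : List Int) (n : Int) :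
    PySem.List.min? (PySem.Set.add s n) (fun x => x) =
      some (match PySem.List.min? s (fun x => x) with
            | none => n
            | some lo => if n < lo then n else lo) := by
  cases h : PySem.List.min? s (fun x => x) with
  | none =>
    have hs : s = [] := (PySem.List.min?_eq_none_iff _ _).mp h
    subst hs
    show PySem.List.min? [n] (fun x => x) = some n
    rw [PySem.List.min?_id_cons]
    simp
  | some lo =>
    have hlo_mem := PySem.List.min?_mem h
    have hlo_min := PySem.List.min?_isMin h
    set c : Int := if n < lo then n else lo with hc
    have hc_mem : c ∈ PySem.Set.add s n := by
      rw [hc]; split_ifs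
      · exact (PySem.Set.mem_add _ _ _).mpr (Or.inr rfl)
      · exact (PySem.Set.mem_add _ _ _).mpr (Or.inl hlo_mem)
    have hc_min : ∀ y ∈ PySem.Set.add s n, c ≤ y := by
      intro y hy
      rcases (PySem.Set.mem_add _ _ _).mp hy with hy | hy
      · have hly : lo ≤ y := hlo_min y hy
        rw [hc]; split_ifs with hlt <;> omega
      · subst hy; rw [hc]; split_ifs with hlt <;> omega
    cases h2 : PySem.List.min? (PySem.Set.add s n) (fun x => x) with
    | none =>
      have : PySem.Set.add s n = [] := (PySem.List.min?_eq_none_iff _ _).mp h2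
      rw [this] at hc_mem; exact absurd hc_mem (List.not_mem_nil)
    | some m =>
      have hm_mem := PySem.List.min?_mem h2
      have hm_min := PySem.List.min?_isMin h2
      have h1 : m ≤ c := hm_min c hc_mem
      have h2' : c ≤ m := hc_min m hm_mem
      have : m = c := le_antisymm h1 h2'
      simp [this, hc]

theorem pvMaxAdd (s : List Int) (n : Int) :
    PySem.List.max? (PySem.Set.add s n) (fun x => x) =
      some (match PySem.List.max? s (fun x => x) with
            | none => n
            | some hi => if hi < n then n else hi) := by
  cases h : PySem.List.max? s (fun x => x) with
  | none =>
    have hs : s = [] := (PySem.List.max?_eq_none_iff _ _).mp h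
    subst hs
    show PySem.List.max? [n] (fun x => x) = some n
    rw [PySem.List.max?_id_cons]
    simp
  | some hi =>
    have hhi_mem := PySem.List.max?_mem h
    have hhi_max := PySem.List.max?_isMax h
    set c : Int := if hi < n then n else hi with hc
    have hc_mem : c ∈ PySem.Set.add s n := by
      rw [hc]; split_ifs
      · exact (PySem.Set.mem_add _ _ _).mpr (Or.inr rfl)
      · exact (PySem.Set.mem_add _ _ _).mpr (Or.inl hhi_mem)
    have hc_max : ∀ y ∈ PySem.Set.add s n, y ≤ c := by
      intro y hy
      rcases (PySem.Set.mem_add _ _ _).mp hy with hy | hy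
      · have hly : y ≤ hi := hhi_max y hy
        rw [hc]; split_ifs with hlt <;> omega
      · subst hy; rw [hc]; split_ifs with hlt <;> omega
    cases h2 : PySem.List.max? (PySem.Set.add s n) (fun x => x) with
    | none =>
      have : PySem.Set.add s n = [] := (PySem.List.max?_eq_none_iff _ _).mp h2
      rw [this] at hc_mem; exact absurd hc_mem (List.not_mem_nil)
    | some m =>
      have hm_mem := PySem.List.max?_mem h2
      have hm_max := PySem.List.max?_isMax h2
      have : c = m := le_antisymm (hm_max c hc_mem) (hc_max m hm_mem)
      simp [← this, hc]

-- loop invariant: B's running pair over the remaining rows equals (min, max) of A's set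
theorem pvFoldInv (rows : List (List (String × String))) :
    ∀ s : List Int,
      rows.foldl (fun (p : Option Int × Option Int) row =>
        match pvRowYear row with
        | some y =>
          ((match p.1 with | none => some y | some lo => if y < lo then some y else some lo),
           (match p.2 with | none => some y | some hi => if hi < y then some y else some hi))
        | none => p)
        (PySem.List.min? s (fun x => x), PySem.List.max? s (fun x => x)) =
      (PySem.List.min? (rows.foldl (fun t row =>
          match pvSelA row with
          | some v => match PySem.Int.ofStr? v with
            | some n => PySem.Set.add t n
            | none => t
          | none => t) s) (fun x => x),
       PySem.List.max? (rows.foldl (fun t row =>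
          match pvSelA row with
          | some v => match PySem.Int.ofStr? v with
            | some n => PySem.Set.add t n
            | none => t
          | none => t) s) (fun x => x)) := by
  induction rows with
  | nil => intro s; simp
  | cons row rest ih =>
    intro s
    simp only [List.foldl_cons]
    have hrow := pvRow_eq row
    cases hsel : pvSelA row with
    | none =>
      have hry : pvRowYear row = none := by rw [← hrow, hsel]
      simp only [hry, hsel]
      exact ih s
    | some v =>
      cases hparse : PySem.Int.ofStr? v with
      | none =>
        have hry : pvRowYear row = none := by rw [← hrow, hsel]; exact hparse
        simp only [hry, hsel, hparse]
        exact ih s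
      | some n =>
        have hry : pvRowYear row = some n := by rw [← hrow, hsel]; exact hparse
        simp only [hry, hsel, hparse]
        have := ih (PySem.Set.add s n)
        rw [pvMinAdd s n, pvMaxAdd s n] at this
        have e1 : (some (match PySem.List.min? s (fun x => x) with
              | none => n | some lo => if n < lo then n else lo) : Option Int) =
            (match PySem.List.min? s (fun x => x) with
              | none => some n | some lo => if n < lo then some n else some lo) := by
          cases PySem.List.min? s (fun x => x) with
          | none => rfl
          | some lo => by_cases hl : n < lo <;> simp [hl]
        have e2 : (some (match PySem.List.max? s (fun x => x) with
              | none => n | some hi => if hi < n then n else hi) : Option Int) =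
            (match PySem.List.max? s (fun x => x) with
              | none => some n | some hi => if hi < n then some n else some hi) := by
          cases PySem.List.max? s (fun x => x) with
          | none => rfl
          | some hi => by_cases hl : hi < n <;> simp [hl]
        rw [e1, e2] at this
        exact this

-- ===== VERDICT (by name: the statement is the Claim_ definition above) =====
theorem get_year_range_spec : Claim_equal_get_year_range := by
  intro compiled_data filename _
  unfold Spec_get_year_range get_year_range get_year_range_alt pvYearsSet
  rw [PySem.Dict.contains_eq_isSome_get?]
  cases hget : (PySem.Dict.mk compiled_data).get? filename with
  | none => simp [PySem.Dict.getD, hget]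
  | some rows =>
    simp only [PySem.Dict.getD, hget, Option.getD_some, Option.isSome_some, Bool.not_true,
      Bool.false_or]
    cases rows with
    | nil => simp
    | cons r rs =>
      simp only [List.isEmpty_cons, Bool.false_eq_true, if_false]
      have h := pvFoldInv (r :: rs) PySem.Set.empty
      have hmin : PySem.List.min? (PySem.Set.empty : PySem.Set Int) (fun x => x) = none :=
        (PySem.List.min?_eq_none_iff _ _).mpr rfl
      have hmax : PySem.List.max? (PySem.Set.empty : PySem.Set Int) (fun x => x) = none :=
        (PySem.List.max?_eq_none_iff _ _).mpr rfl
      rw [hmin, hmax] at h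
      rw [← h]
      split_ifs with hemp
      · -- empty year set: both sides are (none, none)
        rw [h]
        rw [List.isEmpty_iff] at hemp
        rw [hemp]
        rfl
      · rfl
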